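-- pv_equiv track=rewrite | github.com/tymcgee/linalg-calc | old/old2/matrix_format.py | find_longest_strs
-- ===== SOURCE A (Python) =====
-- def find_longest_strs(m):
--     max_lengths = []
--     for i in range(len(m[0])):
--         max_lengths.append(0)
--     # find longest string in each column
--     for row in range(len(m)):
--         for col in range(len(m[0])):
--             if '\n' not in m[row][col]:
--                 max_lengths[col] = max(max_lengths[col], len(m[row][col]))
--             else:
--                 dashes = m[row][col].split('\n')[1]
--                 dash_len = len(dashes)
--                 max_lengths[col] = max(max_lengths[col], dash_len)
--     return max_lengths
-- ===== SOURCE B (Python) =====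
-- def find_longest_strs(m):
--     def cell_len(x):
--         return len(x) if '\n' not in x else len(x.split('\n')[1])
--     return [sorted((cell_len(row[j]) for row in m), reverse=True)[0]
--             for j in range(len(m[0]))]
-- ===== Notes on version B (the rewrite author's own statement) =====
-- stated objective: alternative
-- what changed: B treats each column independently: it sorts the column's cell lengths in descending order and takes the first element, instead of A's pre-sized accumulator list updated in place with a running max across interleaved row/column index loops.
import Mathlib
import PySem

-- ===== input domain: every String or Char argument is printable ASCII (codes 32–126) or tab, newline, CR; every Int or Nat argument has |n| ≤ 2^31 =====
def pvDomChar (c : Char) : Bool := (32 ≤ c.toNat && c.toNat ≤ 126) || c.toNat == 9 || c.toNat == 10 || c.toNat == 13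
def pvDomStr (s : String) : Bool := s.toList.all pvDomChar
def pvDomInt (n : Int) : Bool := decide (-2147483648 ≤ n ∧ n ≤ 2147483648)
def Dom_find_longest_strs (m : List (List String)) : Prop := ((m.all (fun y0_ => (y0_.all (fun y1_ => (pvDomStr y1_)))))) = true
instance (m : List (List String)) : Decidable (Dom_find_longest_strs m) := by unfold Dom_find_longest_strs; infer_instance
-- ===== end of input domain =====

-- B handles each column independently: it sorts the column's cell lengths in descending
-- order and takes the first element, instead of A's in-place running-max accumulator
-- updated across interleaved row/column index loops; objective: alternative.

-- ===== PORT A =====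
def find_longest_strs (m : List (List String)) : List Int :=
  let max_lengths0 : List Int :=
    (PySem.List.pyRange 0 (PySem.List.len ((PySem.List.pyGet? m 0).getD [])) 1).foldl
      (fun acc _ => acc ++ [0]) []
  (PySem.List.pyRange 0 (PySem.List.len m) 1).foldl
    (fun ml row =>
      (PySem.List.pyRange 0 (PySem.List.len ((PySem.List.pyGet? m 0).getD [])) 1).foldl
        (fun ml col =>
          let cell := PySem.List.pyGetD (PySem.List.pyGetD m row []) col ""
          if PySem.Str.isIn "\n" cell = false then
            PySem.List.pySetD ml col (max (PySem.List.pyGetD ml col 0) (PySem.Str.len cell))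
          else
            let dashes := (PySem.List.pyGet? ((PySem.Str.split? cell "\n").getD []) 1).getD ""
            PySem.List.pySetD ml col (max (PySem.List.pyGetD ml col 0) (PySem.Str.len dashes)))
        ml)
    max_lengths0

-- ===== PORT B =====
def pvCellLen (x : String) : Int :=
  if PySem.Str.isIn "\n" x = false then PySem.Str.len x
  else PySem.Str.len ((PySem.List.pyGet? ((PySem.Str.split? x "\n").getD []) 1).getD "")

-- [sorted((cell_len(row[j]) for row in m), reverse=True)[0] for j in range(len(m[0]))]
def find_longest_strs_alt (m : List (List String)) : List Int :=
  (PySem.List.pyRange 0 (PySem.List.len ((PySem.List.pyGet? m 0).getD [])) 1).map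
    (fun j =>
      (PySem.List.pyGet?
        (PySem.List.sorted (m.map (fun row => pvCellLen (PySem.List.pyGetD row j "")))
          (fun y => y) true) 0).getD 0)

-- ===== PRECONDITION & SPEC =====
-- Pre_ excludes exactly the inputs where A raises IndexError: the empty matrix (m[0])
-- and matrices where some row is shorter than the first row (m[row][col] in the inner loop).
def Pre_find_longest_strs (m : List (List String)) : Prop :=
  m ≠ [] ∧ ∀ r ∈ m, (m.headD []).length ≤ r.length
instance (m : List (List String)) : Decidable (Pre_find_longest_strs m) := by
  unfold Pre_find_longest_strs; infer_instance

def pvWitness_find_longest_strs : List (List String) := [["ab", "x\n---\ny"], ["c", "dd"]]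

def Spec_find_longest_strs (m : List (List String)) (out : List Int) : Prop := out = find_longest_strs_alt m
instance (m : List (List String)) (out : List Int) : Decidable (Spec_find_longest_strs m out) := by unfold Spec_find_longest_strs; infer_instance

-- ===== CLAIM (what is proved, stated in full; the proofs are below) =====
def Claim_equal_find_longest_strs : Prop := ∀ (m : List (List String)), Dom_find_longest_strs m → Pre_find_longest_strs m → Spec_find_longest_strs m (find_longest_strs m)


-- ===== LEMMAS AND PROOFS =====

theorem pvCellLen_nonneg (x : String) : 0 ≤ pvCellLen x := by
  unfold pvCellLen; split <;> simp [PySem.Str.len_eq]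

-- the initial accumulator is a list of zeros
theorem pv_init_append (l : List Int) (acc : List Int) :
    l.foldl (fun acc _ => acc ++ [(0 : Int)]) acc = acc ++ List.replicate l.length 0 := by
  induction l generalizing acc with
  | nil => simp
  | cons x t ih =>
      rw [List.foldl_cons, ih, List.append_assoc, List.length_cons, List.replicate_succ]
      rfl

-- A's inner-loop body equals a single pySetD with pvCellLen
theorem pv_body_eq (ml : List Int) (col : Int) (cell : String) :
    (if PySem.Str.isIn "\n" cell = false then
        PySem.List.pySetD ml col (max (PySem.List.pyGetD ml col 0) (PySem.Str.len cell))
      else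
        PySem.List.pySetD ml col (max (PySem.List.pyGetD ml col 0)
          (PySem.Str.len ((PySem.List.pyGet? ((PySem.Str.split? cell "\n").getD []) 1).getD ""))))
    = PySem.List.pySetD ml col (max (PySem.List.pyGetD ml col 0) (pvCellLen cell)) := by
  unfold pvCellLen; split <;> rfl

-- one row pass: length preserved
theorem pv_inner_len (r : List String) (n : Nat) (ml : List Int) :
    ((PySem.List.pyRange 0 (n : Int) 1).foldl
      (fun ml col => PySem.List.pySetD ml col
        (max (PySem.List.pyGetD ml col 0) (pvCellLen (PySem.List.pyGetD r col "")))) ml).length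
    = ml.length := by
  induction n generalizing ml with
  | zero => simp [PySem.List.pyRange_one_eq_nil]
  | succ k ih =>
      have h : ((k : Int) + 1) = ((k + 1 : Nat) : Int) := by push_cast; ring
      rw [← h, PySem.List.pyRange_one_succ_right (by positivity), List.foldl_append]
      simp [ih]

-- one row pass: pointwise value
theorem pv_inner_get (r : List String) (n : Nat) (ml : List Int) (hn : n ≤ ml.length) (j : Nat) :
    PySem.List.pyGetD ((PySem.List.pyRange 0 (n : Int) 1).foldl
      (fun ml col => PySem.List.pySetD ml col
        (max (PySem.List.pyGetD ml col 0) (pvCellLen (PySem.List.pyGetD r col "")))) ml) (j : Int) 0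
    = if j < n then max (PySem.List.pyGetD ml (j : Int) 0) (pvCellLen (r.getD j ""))
      else PySem.List.pyGetD ml (j : Int) 0 := by
  induction n generalizing ml with
  | zero => simp [PySem.List.pyRange_one_eq_nil]
  | succ k ih =>
      have h : ((k : Int) + 1) = ((k + 1 : Nat) : Int) := by push_cast; ring
      rw [← h, PySem.List.pyRange_one_succ_right (by positivity), List.foldl_append]
      have hlen : ((PySem.List.pyRange 0 (k : Int) 1).foldl
          (fun ml col => PySem.List.pySetD ml col
            (max (PySem.List.pyGetD ml col 0) (pvCellLen (PySem.List.pyGetD r col "")))) ml).length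
          = ml.length := pv_inner_len r k ml
      simp only [List.foldl_cons, List.foldl_nil]
      rw [PySem.List.pyGetD_pySetD_natCast _ k j _ _ (by omega)]
      rw [ih ml (by omega)]
      by_cases hjk : j = k
      · subst hjk
        have h2 := ih ml (by omega)
        rw [if_neg (lt_irrefl j)] at h2
        rw [if_pos rfl, if_pos (Nat.lt_succ_self j), h2]
        simp
      · by_cases hj : j < k
        · rw [if_neg hjk, if_pos hj, if_pos (by omega : j < k + 1)]
        · rw [if_neg hjk, if_neg hj, if_neg (by omega : ¬ j < k + 1)]

-- folding A's row passes over a list of rows, pointwise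
theorem pv_outer_get (rows : List (List String)) (n : Nat) (acc : List Int)
    (hn : n ≤ acc.length) (j : Nat) (hj : j < n) :
    PySem.List.pyGetD (rows.foldl
      (fun ml r => (PySem.List.pyRange 0 (n : Int) 1).foldl
        (fun ml col => PySem.List.pySetD ml col
          (max (PySem.List.pyGetD ml col 0) (pvCellLen (PySem.List.pyGetD r col "")))) ml) acc) (j : Int) 0
    = (rows.map (fun r => pvCellLen (r.getD j ""))).foldl max (PySem.List.pyGetD acc (j : Int) 0) := by
  induction rows generalizing acc with
  | nil => simp
  | cons r rs ih =>
      simp only [List.foldl_cons, List.map_cons]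
      rw [ih _ (by rw [pv_inner_len]; exact hn)]
      rw [pv_inner_get r n acc hn j]
      simp [hj]

theorem pv_outer_len (rows : List (List String)) (n : Nat) (acc : List Int) :
    (rows.foldl
      (fun ml r => (PySem.List.pyRange 0 (n : Int) 1).foldl
        (fun ml col => PySem.List.pySetD ml col
          (max (PySem.List.pyGetD ml col 0) (pvCellLen (PySem.List.pyGetD r col "")))) ml) acc).length
    = acc.length := by
  induction rows generalizing acc with
  | nil => rfl
  | cons r rs ih => rw [List.foldl_cons, ih, pv_inner_len]

-- head of a descending sort of a nonempty Int list IS the running max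
theorem pv_sorted_rev_head (x : Int) (t : List Int) :
    (PySem.List.pyGet? (PySem.List.sorted (x :: t) (fun y => y) true) 0).getD 0
    = t.foldl max x := by
  rcases hs : PySem.List.sorted (x :: t) (fun y => y) true with _ | ⟨hd, tl⟩
  · exact absurd ((PySem.List.sorted_eq_nil_iff _ _ _).mp hs) (by simp)
  · have hge : ∀ y ∈ (x :: t), y ≤ hd := by
      have := PySem.List.key_head_sorted_rev_ge (xs := x :: t) (key := fun y => y) hs
      simpa using this
    have hmem : hd ∈ (x :: t) := by
      have : hd ∈ PySem.List.sorted (x :: t) (fun y => y) true := by rw [hs]; simp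
      exact (PySem.List.mem_sorted _ _ _ _).mp this
    have hM : PySem.List.max? (x :: t) (fun y => y) = some (t.foldl max x) :=
      PySem.List.max?_id_cons x t
    have hMmem : t.foldl max x ∈ (x :: t) := PySem.List.max?_mem hM
    have hMmax : ∀ y ∈ (x :: t), y ≤ t.foldl max x := by
      have := PySem.List.max?_isMax hM
      simpa using this
    have : hd = t.foldl max x := le_antisymm (hMmax hd hmem) (hge _ hMmem)
    simp [this]

-- ===== VERDICT (by name: the statement is the Claim_ definition above) =====
theorem find_longest_strs_spec : Claim_equal_find_longest_strs := by
  intro m _ hpre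
  obtain ⟨hne, hrows⟩ := hpre
  obtain ⟨r0, rs, rfl⟩ : ∃ r0 rs, m = r0 :: rs := by
    cases m with
    | nil => exact absurd rfl hne
    | cons a b => exact ⟨a, b, rfl⟩
  unfold Spec_find_longest_strs
  set n := r0.length with hn
  have hhead : (PySem.List.pyGet? (r0 :: rs) 0).getD [] = r0 := by
    simp
  unfold find_longest_strs
  rw [hhead]
  have hinit : (PySem.List.pyRange 0 (PySem.List.len r0) 1).foldl
      (fun acc _ => acc ++ [(0:Int)]) [] = List.replicate n 0 := by
    rw [pv_init_append]
    simp [PySem.List.len_eq, PySem.List.length_pyRange_one, hn]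
  rw [hinit]
  have hA := PySem.List.foldl_pyRange_zero_pyGetD (r0 :: rs) ([] : List String)
      (fun ml r => (PySem.List.pyRange 0 (PySem.List.len r0) 1).foldl
        (fun ml col => PySem.List.pySetD ml col
          (max (PySem.List.pyGetD ml col 0) (pvCellLen (PySem.List.pyGetD r col "")))) ml)
      (List.replicate n (0:Int))
  simp only [pv_body_eq] at *
  simp only [PySem.List.len_eq, hn] at hA ⊢
  rw [hA]
  -- B side
  unfold find_longest_strs_alt
  rw [hhead]
  simp only [PySem.List.len_eq, ← hn]
  apply List.ext_getElem
  · rw [pv_outer_len]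
    simp [PySem.List.length_pyRange_one]
  · intro j hj1 hj2
    have hjn : j < n := by
      rw [pv_outer_len] at hj1
      simpa using hj1
    have hget := pv_outer_get (r0 :: rs) n (List.replicate n (0:Int)) (by simp) j hjn
    simp only [PySem.List.pyGetD_natCast, List.getD_eq_getElem?_getD,
      List.getElem?_eq_getElem hj1, Option.getD_some, List.getElem?_replicate,
      if_pos hjn] at hget
    rw [hget]
    -- the j-th element of B's map
    have hidx : (PySem.List.pyRange 0 (n : Int) 1)[j]'(by
        simpa [PySem.List.length_pyRange_one] using hj2) = (j : Int) := by
      rw [PySem.List.getElem_pyRange_one]; ring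
    simp only [List.getElem_map]
    rw [hidx]
    have hdg : ∀ r : List String, PySem.List.pyGetD r (j : Int) "" = r.getD j "" := by
      intro r; simp [PySem.List.pyGetD_natCast]
    simp only [hdg, List.map_cons]
    rw [pv_sorted_rev_head]
    simp only [List.foldl_cons, List.getD_eq_getElem?_getD]
    rw [max_eq_right (pvCellLen_nonneg _)]
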